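-- pv_equiv track=rewrite | github.com/WhiteboxHub/project-Active-Cookie | src/cookie_analyzer.py | get_most_active_cookies
-- ===== SOURCE A (Python) =====
-- from collections import defaultdict
--
-- def get_most_active_cookies(records, target_date):
--
--     counter = defaultdict(int)
--     for cookie, date in records:
--         if date == target_date:
--             counter[cookie] += 1
--
--     if not counter:
--         return []
--
--     max_count = max(counter.values())
--     most_active = [cookie for cookie, count in counter.items() if count == max_count]
--     return most_active
-- ===== SOURCE B (Python) =====
-- def get_most_active_cookies(records, target_date):
--     dated = [cookie for cookie, date in records if date == target_date]
--     seen = []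
--     max_count = 0
--     best = []
--     for c in dated:
--         if c in seen:
--             continue
--         seen.append(c)
--         n = dated.count(c)
--         if n > max_count:
--             max_count = n
--             best = [c]
--         elif n == max_count:
--             best.append(c)
--     return best
-- ===== Notes on version B (the rewrite author's own statement) =====
-- stated objective: alternative
-- what changed: Drops the counting dict entirely: B filters the matching-date cookies into a list and in one pass over it (skipping already-seen cookies) recounts each cookie with list.count while maintaining a running maximum and the current winners list.
import Mathlib
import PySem

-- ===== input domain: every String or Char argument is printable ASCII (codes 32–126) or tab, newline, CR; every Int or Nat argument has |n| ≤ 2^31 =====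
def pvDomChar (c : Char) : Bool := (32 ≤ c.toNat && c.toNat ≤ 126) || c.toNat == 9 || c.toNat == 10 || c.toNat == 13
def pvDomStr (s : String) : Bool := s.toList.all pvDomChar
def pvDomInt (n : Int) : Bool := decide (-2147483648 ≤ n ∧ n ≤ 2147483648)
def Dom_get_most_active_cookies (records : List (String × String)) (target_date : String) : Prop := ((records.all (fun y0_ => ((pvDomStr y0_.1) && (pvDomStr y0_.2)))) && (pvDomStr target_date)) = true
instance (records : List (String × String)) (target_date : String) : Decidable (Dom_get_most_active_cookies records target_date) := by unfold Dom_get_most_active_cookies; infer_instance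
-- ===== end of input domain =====

-- B drops A's counting dict entirely: it filters the matching-date cookies into a list and,
-- in one pass over that list skipping already-seen cookies, recounts each cookie with
-- list.count while maintaining a running maximum and the current list of winners
-- (alternative decomposition, same result including tie order).

-- ===== PORT A =====
def get_most_active_cookies (records : List (String × String)) (target_date : String) : List String :=
  let counter := records.foldl
    (fun d r => if r.2 == target_date then d.modify r.1 0 (· + 1) else d)
    (PySem.Dict.empty : PySem.Dict String Int)
  if counter.items.isEmpty then []
  else
    match PySem.List.max? counter.values (fun v => v) with
    | some m => (counter.items.filter (fun p => p.2 == m)).map (·.1)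
    | none => []  -- unreachable: guarded by the emptiness check (Python max would raise there)

-- ===== PORT B =====
def get_most_active_cookies_alt (records : List (String × String)) (target_date : String) : List String :=
  let dated := (records.filter (fun r => r.2 == target_date)).map (·.1)
  -- state = (seen, max_count, best); 'continue' on an already-seen cookie
  let r := dated.foldl
    (fun st c =>
      if st.1.contains c then st
      else
        let seen := st.1 ++ [c]
        let n : Int := (PySem.List.count dated c : Int)
        if st.2.1 < n then (seen, n, [c])
        else if n == st.2.1 then (seen, st.2.1, st.2.2 ++ [c])
        else (seen, st.2.1, st.2.2))
    (([] : List String), (0 : Int), ([] : List String))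
  r.2.2

-- ===== PRECONDITION & SPEC =====
def Spec_get_most_active_cookies (records : List (String × String)) (target_date : String) (out : List String) : Prop := out = get_most_active_cookies_alt records target_date
instance (records : List (String × String)) (target_date : String) (out : List String) : Decidable (Spec_get_most_active_cookies records target_date out) := by unfold Spec_get_most_active_cookies; infer_instance

-- ===== CLAIM (what is proved, stated in full; the proofs are below) =====
def Claim_equal_get_most_active_cookies : Prop := ∀ (records : List (String × String)) (target_date : String), Dom_get_most_active_cookies records target_date → Spec_get_most_active_cookies records target_date (get_most_active_cookies records target_date)

-- ===== LEMMAS AND PROOFS =====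

-- the cookies B's loop actually processes: elements of l not in s, first occurrences only
def pvFresh : List String → List String → List String
  | _, [] => []
  | s, c :: t => if s.contains c then pvFresh s t else c :: pvFresh (s ++ [c]) t

theorem pv_foldl_add (l : List String) : ∀ s : List String,
    l.foldl PySem.Set.add s = s ++ pvFresh s l := by
  induction l with
  | nil => intro s; simp [pvFresh]
  | cons c t ih =>
    intro s
    by_cases h : c ∈ s
    · have hb : s.contains c = true := by simpa using h
      have hadd : PySem.Set.add s c = s := by
        simp [PySem.Set.add, PySem.Set.contains, h]
      simp [pvFresh, hb, h, hadd, ih]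
    · have hb : s.contains c = false := by simpa using h
      have hadd : PySem.Set.add s c = s ++ [c] := by
        simp [PySem.Set.add, PySem.Set.contains, h]
      simp [pvFresh, hb, h, hadd, ih]

-- a fold that skips seen elements = the plain fold over the fresh elements
theorem pv_skip_fold (g : Int × List String → String → Int × List String)
    (f : List String × Int × List String → String → List String × Int × List String)
    (hf : ∀ st c, f st c = if st.1.contains c then st else (st.1 ++ [c], g st.2 c)) :
    ∀ (l s : List String) (σ : Int × List String),
      l.foldl f (s, σ) = (l.foldl PySem.Set.add s, (pvFresh s l).foldl g σ) := by
  intro l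
  induction l with
  | nil => intro s σ; simp [pvFresh]
  | cons c t ih =>
    intro s σ
    rw [List.foldl_cons, hf]
    by_cases h : c ∈ s
    · have hb : s.contains c = true := by simpa using h
      have hadd : PySem.Set.add s c = s := by
        simp [PySem.Set.add, PySem.Set.contains, h]
      simp [hb, h, pvFresh, hadd, ih]
    · have hb : s.contains c = false := by simpa using h
      have hadd : PySem.Set.add s c = s ++ [c] := by
        simp [PySem.Set.add, PySem.Set.contains, h]
      simp [hb, h, pvFresh, hadd, ih]

-- the running-max loop returns the maximum and exactly the elements achieving it, in order
theorem pv_maxrun (cnt : String → Int) (l : List String) :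
    let r := l.foldl
      (fun st c => if st.1 < cnt c then (cnt c, [c])
                   else if cnt c == st.1 then (st.1, st.2 ++ [c]) else st)
      ((0 : Int), ([] : List String))
    0 ≤ r.1 ∧ (∀ x ∈ l, cnt x ≤ r.1) ∧
      r.2 = l.filter (fun c => cnt c == r.1) ∧
      (r.1 = 0 ∨ ∃ x ∈ l, cnt x = r.1) := by
  induction l using List.reverseRecOn with
  | nil => simp
  | append_singleton t c ih =>
    simp only [List.foldl_append, List.foldl_cons, List.foldl_nil] at *
    obtain ⟨h0, hle, hfil, hex⟩ := ih
    set r := t.foldl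
      (fun st c => if st.1 < cnt c then (cnt c, [c])
                   else if cnt c == st.1 then (st.1, st.2 ++ [c]) else st)
      ((0 : Int), ([] : List String)) with hr
    by_cases hgt : r.1 < cnt c
    · have hred : (if r.1 < cnt c then (cnt c, [c])
          else if cnt c == r.1 then (r.1, r.2 ++ [c]) else r) = (cnt c, [c]) := by
        simp [hgt]
      rw [hred]
      have htf : t.filter (fun x => cnt x == cnt c) = [] := by
        rw [List.filter_eq_nil_iff]
        intro x hx
        have := hle x hx
        simp
        omega
      refine ⟨by omega, ?_, ?_, Or.inr ⟨c, by simp, by simp⟩⟩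
      · intro x hx
        rcases List.mem_append.mp hx with h | h
        · have := hle x h; simp; omega
        · simp at h; simp [h]
      · simp [List.filter_append, htf]
    · by_cases heq : cnt c = r.1
      · have hred : (if r.1 < cnt c then (cnt c, [c])
            else if cnt c == r.1 then (r.1, r.2 ++ [c]) else r) = (r.1, r.2 ++ [c]) := by
          simp [hgt, heq]
        rw [hred]
        refine ⟨h0, ?_, ?_, Or.inr ⟨c, by simp, by simpa using heq⟩⟩
        · intro x hx
          rcases List.mem_append.mp hx with h | h
          · have := hle x h; simpa using this
          · simp at h; subst h; simp [heq]
        · simp [List.filter_append, hfil, heq]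
      · have hred : (if r.1 < cnt c then (cnt c, [c])
            else if cnt c == r.1 then (r.1, r.2 ++ [c]) else r) = r := by
          simp [hgt, heq]
        rw [hred]
        refine ⟨h0, ?_, ?_, hex.imp id (fun ⟨x, hx, hcx⟩ => ⟨x, by simp [hx], hcx⟩)⟩
        · intro x hx
          rcases List.mem_append.mp hx with h | h
          · exact hle x h
          · simp at h; subst h; omega
        · have hne : ¬ ((cnt c == r.1) = true) := by simp [heq]
          simp [List.filter_append, hfil, hne]

-- ===== VERDICT (by name: the statement is the Claim_ definition above) =====
theorem get_most_active_cookies_spec : Claim_equal_get_most_active_cookies := by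
  intro records target_date _
  unfold Spec_get_most_active_cookies
  simp only [get_most_active_cookies, get_most_active_cookies_alt]
  set dated := (records.filter (fun r => r.2 == target_date)).map (·.1) with hdated
  set cnt : String → Int := fun c => ((List.count c dated : Nat) : Int) with hcnt
  set g : Int × List String → String → Int × List String := fun st c =>
    if st.1 < cnt c then (cnt c, [c])
    else if cnt c == st.1 then (st.1, st.2 ++ [c]) else st with hg
  -- A's counting loop builds Counter(dated)
  have hc : records.foldl
      (fun d r => if r.2 == target_date then d.modify r.1 0 (· + 1) else d)
      (PySem.Dict.empty : PySem.Dict String Int) = PySem.Dict.counter dated := by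
    rw [PySem.Dict.counter_eq_foldl, hdated, List.foldl_map, List.foldl_filter]
  rw [hc]
  -- B's loop = running-max fold over the fresh (first-occurrence) cookies
  rw [pv_skip_fold g
    (fun st c =>
      if st.1.contains c then st
      else
        let seen := st.1 ++ [c]
        let n : Int := (PySem.List.count dated c : Int)
        if st.2.1 < n then (seen, n, [c])
        else if n == st.2.1 then (seen, st.2.1, st.2.2 ++ [c])
        else (seen, st.2.1, st.2.2))
    (by
      intro st c
      by_cases h : c ∈ st.1
      · have hb : st.1.contains c = true := by simpa using h
        simp [h]
      · have hb : st.1.contains c = false := by simpa using h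
        simp only [hb, Bool.false_eq_true, if_false, hg, PySem.List.count_eq, hcnt]
        split_ifs <;> simp_all)
    dated [] ((0 : Int), ([] : List String))]
  have hfresh : pvFresh [] dated = PySem.Set.ofList dated := by
    rw [PySem.Set.ofList_eq_foldl, pv_foldl_add]
    simp
  rw [hfresh]
  obtain ⟨h0, hle, hfil, hex⟩ := pv_maxrun cnt (PySem.Set.ofList dated)
  set r := (PySem.Set.ofList dated).foldl g ((0 : Int), ([] : List String)) with hrdef
  have hitems : (PySem.Dict.counter dated).items
      = (PySem.Set.ofList dated).map (fun k => (k, cnt k)) := by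
    rw [PySem.Dict.items_counter]
  by_cases hdnil : dated = []
  · -- no matching records: both sides return []
    have h1 : (PySem.Dict.counter dated).items = [] := by
      rw [hitems, hdnil]; simp [PySem.Set.ofList]
    have h2 : r = ((0 : Int), ([] : List String)) := by
      rw [hrdef, hdnil]; simp [PySem.Set.ofList]
    simp [h1, h2]
  · -- at least one matching cookie
    obtain ⟨c0, dt, hd⟩ : ∃ c0 dt, dated = c0 :: dt := by
      rcases h : dated with _ | ⟨x, xs⟩
      · exact absurd h hdnil
      · exact ⟨x, xs, rfl⟩
    have hc0D : c0 ∈ PySem.Set.ofList dated :=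
      (PySem.Set.mem_ofList _ _).mpr (by rw [hd]; simp)
    have hDne : PySem.Set.ofList dated ≠ [] := by
      intro h; rw [h] at hc0D; simp at hc0D
    have hitems_ne : (PySem.Dict.counter dated).items ≠ [] := by
      rw [hitems]; simpa using hDne
    have hie : (PySem.Dict.counter dated).items.isEmpty = false := by
      simpa [List.isEmpty_iff] using hitems_ne
    have hvals : (PySem.Dict.counter dated).values
        = (PySem.Set.ofList dated).map cnt := by
      simp only [PySem.Dict.values, hitems, List.map_map]
      rfl
    have hvne : (PySem.Dict.counter dated).values ≠ [] := by
      rw [hvals]; simpa using hDne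
    obtain ⟨m, hm⟩ : ∃ m, PySem.List.max? (PySem.Dict.counter dated).values (fun v => v) = some m := by
      rcases h : PySem.List.max? (PySem.Dict.counter dated).values (fun v => v) with _ | m
      · exact absurd ((PySem.List.max?_eq_none_iff _ _).mp h) hvne
      · exact ⟨m, rfl⟩
    -- the loop's maximum equals Python's max of the counter values
    have hc0 : (1 : Int) ≤ cnt c0 := by
      have hmem : c0 ∈ dated := by rw [hd]; simp
      have := List.count_pos_iff.mpr hmem
      show (1 : Int) ≤ ((List.count c0 dated : Nat) : Int)
      omega
    have hr1ne : r.1 ≠ 0 := by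
      have := hle c0 hc0D
      omega
    obtain ⟨x, hxD, hxr⟩ := hex.resolve_left hr1ne
    have hr1mem : r.1 ∈ (PySem.Dict.counter dated).values := by
      rw [hvals]
      exact List.mem_map.mpr ⟨x, hxD, hxr⟩
    have hrlem : r.1 ≤ m := by
      have := PySem.List.max?_isMax hm r.1 hr1mem
      simpa using this
    have hmler : m ≤ r.1 := by
      have hmmem := PySem.List.max?_mem hm
      rw [hvals] at hmmem
      obtain ⟨y, hyD, hym⟩ := List.mem_map.mp hmmem
      rw [← hym]
      exact hle y hyD
    have hmr : m = r.1 := le_antisymm hmler hrlem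
    -- A's filtered items are exactly the loop's winners
    rw [hie, hm, hmr]
    simp only [Bool.false_eq_true, if_false]
    rw [hitems, List.filter_map, List.map_map, hfil]
    have hcomp : ((fun p : String × Int => p.2 == r.1) ∘ fun k => (k, cnt k))
        = fun c => cnt c == r.1 := by
      funext k; rfl
    rw [hcomp]
    have hcomp2 : ((fun x : String × Int => x.1) ∘ fun k => (k, cnt k)) = id := by
      funext k; rfl
    rw [hcomp2, List.map_id]
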